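-- pv_equiv track=rewrite | github.com/miliar/Code_Jam_Webscraper | solutions_python/Problem_200/3108.py | find_nearest_tidy
-- ===== SOURCE A (Python) =====
-- def find_nearest_tidy(number):
-- # Number must be a list of characters
--     sequence_start = None
--     previous = None
--
--     untidy = False
--     for index, digit in enumerate(number):
--         if digit != previous:
--             if previous is not None:
--                 if int(digit) < int(previous):
--                     # Number is not tidy
--                     untidy = True
--                     break
--
--             sequence_start = index
--
--         previous = digit
--
--     if untidy:
--         # Decrement sequence start by one
--         number[sequence_start] = str(int(number[sequence_start]) - 1)
--
--         # Replace tail with all 9s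
--         for index in range(sequence_start+1, len(number)):
--             number[index] = '9'
--
--     return int(''.join(number))
-- ===== SOURCE B (Python) =====
-- def find_nearest_tidy(number):
--     # Single backward pass, no early break and no run bookkeeping: scan pairs
--     # right-to-left, set mark at every descent, and chain mark leftward across
--     # equal neighbours; then decrement the digit left of the final mark and
--     # overwrite the rest with '9'.
--     mark = None
--     for i in range(len(number) - 1, 0, -1):
--         if int(number[i - 1]) > int(number[i]) or (number[i - 1] == number[i] and mark == i + 1):
--             mark = i
--     if mark is not None:
--         number[mark - 1] = str(int(number[mark - 1]) - 1)
--         number[mark:] = ['9'] * (len(number) - mark)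
--     return int(''.join(number))
-- ===== Notes on version B (the rewrite author's own statement) =====
-- stated objective: alternative
-- what changed: A scans left-to-right carrying previous/sequence_start/untidy state and breaks at the first descent before decrementing and 9-filling; B is a single right-to-left pass with no early break and no run bookkeeping: it sets a mark at every descending pair and chains the mark leftward across equal neighbours, so the final mark is the fix boundary, then does one decrement and one slice fill.
-- outside the precondition, e.g. on find_nearest_tidy(['9', '1', 'ab']): A returns 899, B raises ValueError; on find_nearest_tidy(['9', ' 9', '1']): A returns 989, B returns 989
import Mathlib
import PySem

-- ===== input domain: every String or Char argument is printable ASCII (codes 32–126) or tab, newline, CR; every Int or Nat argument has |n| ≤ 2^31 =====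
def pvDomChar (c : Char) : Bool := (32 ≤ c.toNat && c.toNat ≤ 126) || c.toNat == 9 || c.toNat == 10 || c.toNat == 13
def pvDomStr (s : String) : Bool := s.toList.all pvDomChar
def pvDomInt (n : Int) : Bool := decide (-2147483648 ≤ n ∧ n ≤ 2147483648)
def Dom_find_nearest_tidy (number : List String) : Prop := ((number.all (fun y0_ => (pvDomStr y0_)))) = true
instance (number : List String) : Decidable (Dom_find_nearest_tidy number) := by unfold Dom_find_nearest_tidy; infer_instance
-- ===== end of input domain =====

-- B replaces A's left-to-right scan (previous/sequence_start/untidy state, early break at the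
-- first descent) by a single right-to-left pass with no early break: it marks every descending
-- pair and chains the mark leftward across equal neighbours, then does one decrement and one
-- slice fill (alternative decomposition, same cost). Both Pythons mutate `number` in place and,
-- on Pre_ inputs, leave it in the same final state; the equivalence proved here is about the
-- return value.


-- ===== PORT A =====
-- A's scan loop: state (index, previous, sequence_start); returns (untidy, sequence_start).
def pvALoop : List String → Nat → Option String → Option Nat → Bool × Option Nat
  | [], _, _, ss => (false, ss)
  | d :: rest, idx, prev, ss =>
    if some d ≠ prev then
      match prev with
      | some p =>
        if (PySem.Int.ofStr? d).getD 0 < (PySem.Int.ofStr? p).getD 0 then (true, ss)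
        else pvALoop rest (idx + 1) (some d) (some idx)
      | none => pvALoop rest (idx + 1) (some d) (some idx)
    else pvALoop rest (idx + 1) (some d) ss

def find_nearest_tidy (number : List String) : Int :=
  let r := pvALoop number 0 none none
  let number' :=
    if r.1 then
      let s := r.2.getD 0
      let n1 := number.set s (PySem.Int.toStr ((PySem.Int.ofStr? (number.getD s "")).getD 0 - 1))
      (PySem.List.pyRange ((s : Int) + 1) number.length 1).foldl
        (fun acc i => acc.set i.toNat "9") n1
    else number
  (PySem.Int.ofStr? (PySem.Str.join "" number')).getD 0

-- ===== PORT B =====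
-- B's `for i in range(len(number)-1, 0, -1)` mark-chaining pass: the Nat argument is
-- Python's i, counting down to 0; state = mark.
def pvCLoop : List String → Nat → Option Nat → Option Nat
  | _, 0, m => m
  | l, k + 1, m =>
    pvCLoop l k
      (if (PySem.Int.ofStr? (l.getD (k + 1) "")).getD 0 < (PySem.Int.ofStr? (l.getD k "")).getD 0
          ∨ (l.getD k "" = l.getD (k + 1) "" ∧ m = some (k + 2))
       then some (k + 1) else m)

def find_nearest_tidy_alt (number : List String) : Int :=
  let mk := pvCLoop number (number.length - 1) none
  let number' :=
    match mk with
    | none => number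
    | some j =>
      let n1 := number.set (j - 1)
        (PySem.Int.toStr ((PySem.Int.ofStr? (number.getD (j - 1) "")).getD 0 - 1))
      n1.take j ++ List.replicate (number.length - j) "9"
  (PySem.Int.ofStr? (PySem.Str.join "" number')).getD 0

-- ===== PRECONDITION & SPEC =====
-- Pre_ excludes exactly the raising corners: the empty list (A raises ValueError on int('')),
-- lists with an unparseable token A reads before its early break or an unparseable join (A
-- raises ValueError), and lists with an unparseable token AFTER A's early break (A returns but
-- B, which has no early break, raises ValueError there). On some lists whose original join
-- alone fails to parse both still return (identically); they fall outside this closed-form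
-- condition; see claim cites.
def Pre_find_nearest_tidy (number : List String) : Prop :=
  number ≠ [] ∧ (∀ s ∈ number, (PySem.Int.ofStr? s).isSome = true) ∧
    (PySem.Int.ofStr? (PySem.Str.join "" number)).isSome = true
instance (number : List String) : Decidable (Pre_find_nearest_tidy number) := by
  unfold Pre_find_nearest_tidy; infer_instance

def pvWitness_find_nearest_tidy : List String := ["3", "3", "2"]

def Spec_find_nearest_tidy (number : List String) (out : Int) : Prop := out = find_nearest_tidy_alt number
instance (number : List String) (out : Int) : Decidable (Spec_find_nearest_tidy number out) := by
  unfold Spec_find_nearest_tidy; infer_instance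

-- ===== CLAIM (what is proved, stated in full; the proofs are below) =====
def Claim_equal_find_nearest_tidy : Prop := ∀ (number : List String), Dom_find_nearest_tidy number → Pre_find_nearest_tidy number → Spec_find_nearest_tidy number (find_nearest_tidy number)

-- ===== LEMMAS AND PROOFS =====

abbrev pvDval (s : String) : Int := (PySem.Int.ofStr? s).getD 0
abbrev pvDec (s : String) : String := PySem.Int.toStr (pvDval s - 1)

-- reference scan: none = tidy; some s = start of the run of equal strings before the first descent
def pvSpec : List String → Option Nat
  | [] => none
  | [_] => none
  | x :: y :: t =>
    if pvDval y < pvDval x then some 0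
    else
      match pvSpec (y :: t) with
      | none => none
      | some s => if x = y ∧ s = 0 then some 0 else some (s + 1)

theorem pvSpec_len : ∀ (l : List String) (s : Nat), pvSpec l = some s → s + 2 ≤ l.length := by
  intro l
  induction l with
  | nil => intro s h; simp [pvSpec] at h
  | cons x t ih =>
    cases t with
    | nil => intro s h; simp [pvSpec] at h
    | cons y t2 =>
      intro s h
      simp only [pvSpec] at h
      split at h
      · injection h with h; subst h; simp
      · split at h
        · simp at h
        · rename_i s' heq
          have := ih s' heq
          split at h <;> injection h with h <;> subst h <;>
            simp only [List.length_cons] at this ⊢ <;> omega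

theorem take_succ_set (l : List String) (a : Nat) (v : String) (h : a < l.length) :
    (l.set a v).take (a+1) = l.take a ++ [v] := by
  rw [List.set_eq_take_append_cons_drop, if_pos h, List.take_append]
  simp [List.length_take, Nat.min_eq_left (Nat.le_of_lt h)]

theorem pvFill9 : ∀ (n : Nat) (l : List String) (a : Nat), l.length ≤ a + n → a ≤ l.length →
    (PySem.List.pyRange (a : Int) (l.length : Int) 1).foldl (fun acc i => acc.set i.toNat "9") l
      = l.take a ++ List.replicate (l.length - a) "9" := by
  intro n
  induction n with
  | zero =>
    intro l a h1 h2
    have : a = l.length := by omega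
    subst this
    rw [PySem.List.pyRange_one_eq_nil (by omega)]
    simp
  | succ n ih =>
    intro l a h1 h2
    rcases Nat.eq_or_lt_of_le h2 with he | hlt
    · subst he
      rw [PySem.List.pyRange_one_eq_nil (by omega)]
      simp
    · rw [PySem.List.pyRange_one_cons (by exact_mod_cast hlt)]
      simp only [List.foldl_cons, Int.toNat_natCast]
      have hcast : ((a : Int) + 1) = ((a + 1 : Nat) : Int) := by push_cast; ring
      have hlen : (l.set a "9").length = l.length := by simp
      rw [hcast, ← hlen]
      rw [ih (l.set a "9") (a+1) (by omega) (by omega)]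
      rw [take_succ_set l a "9" hlt, hlen]
      have : l.length - (a+1) = l.length - a - 1 := by omega
      rw [this]
      have hrep : ("9" : String) :: List.replicate (l.length - a - 1) "9" = List.replicate (l.length - a) "9" := by
        rw [← List.replicate_succ]
        congr 1
        omega
      simp [← hrep]

theorem pvALoop_spec : ∀ (l : List String) (p : String) (idx jdx : Nat),
    (pvSpec (p :: l) = none → (pvALoop l (idx + 1) (some p) (some jdx)).1 = false) ∧
    (pvSpec (p :: l) = some 0 → pvALoop l (idx + 1) (some p) (some jdx) = (true, some jdx)) ∧
    (∀ s, pvSpec (p :: l) = some (s + 1) →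
      pvALoop l (idx + 1) (some p) (some jdx) = (true, some (idx + 1 + s))) := by
  intro l
  induction l with
  | nil =>
    intro p idx jdx
    refine ⟨fun _ => rfl, fun h => ?_, fun s h => ?_⟩ <;> simp [pvSpec] at h
  | cons y t ih =>
    intro p idx jdx
    by_cases hyp : y = p
    · have hnd : ¬ (pvDval y < pvDval p) := by rw [hyp]; omega
      have hred : pvALoop (y :: t) (idx + 1) (some p) (some jdx)
          = pvALoop t (idx + 2) (some y) (some jdx) := by
        simp only [pvALoop, hyp]
        norm_num
      have hspec : pvSpec (p :: y :: t)
          = match pvSpec (y :: t) with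
            | none => none
            | some s => if p = y ∧ s = 0 then some 0 else some (s + 1) := by
        simp only [pvSpec, if_neg hnd]
      obtain ⟨ih1, ih2, ih3⟩ := ih y (idx + 1) jdx
      refine ⟨fun h => ?_, fun h => ?_, fun s h => ?_⟩ <;> rw [hspec] at h <;> rw [hred]
      · split at h
        · rename_i heq; exact ih1 heq
        · split at h <;> simp at h
      · split at h
        · simp at h
        · rename_i s' heq
          split at h
          · rename_i hc
            rw [hc.2] at heq
            exact ih2 heq
          · simp at h
      · split at h
        · simp at h
        · rename_i s' heq
          split at h
          · simp at h
          · injection h with h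
            cases s' with
            | zero =>
              rename_i hc
              exact absurd ⟨hyp.symm, rfl⟩ hc
            | succ s'' =>
              have hs2 : s = s'' + 1 := by omega
              subst hs2
              rw [ih3 s'' heq]
              congr 2
              omega
    · by_cases hd : pvDval y < pvDval p
      · have hred : pvALoop (y :: t) (idx + 1) (some p) (some jdx) = (true, some jdx) := by
          simp only [pvALoop]
          rw [if_pos (by simp [hyp]), if_pos hd]
        have hspec : pvSpec (p :: y :: t) = some 0 := by simp only [pvSpec, if_pos hd]
        refine ⟨fun h => ?_, fun _ => hred, fun s h => ?_⟩ <;> rw [hspec] at h <;> simp at h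
      · have hred : pvALoop (y :: t) (idx + 1) (some p) (some jdx)
            = pvALoop t (idx + 2) (some y) (some (idx + 1)) := by
          simp only [pvALoop]
          rw [if_pos (by simp [hyp]), if_neg hd]
        have hspec : pvSpec (p :: y :: t)
            = match pvSpec (y :: t) with
              | none => none
              | some s => some (s + 1) := by
          simp only [pvSpec, if_neg hd]
          cases hs : pvSpec (y :: t) with
          | none => rfl
          | some s' => simp [Ne.symm hyp]
        obtain ⟨ih1, ih2, ih3⟩ := ih y (idx + 1) (idx + 1)
        refine ⟨fun h => ?_, fun h => ?_, fun s h => ?_⟩ <;> rw [hspec] at h <;> rw [hred]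
        · split at h
          · rename_i heq; exact ih1 heq
          · simp at h
        · split at h
          · simp at h
          · simp at h
        · cases hs : pvSpec (y :: t) with
          | none => rw [hs] at h; simp at h
          | some s' =>
            rw [hs] at h
            change some (s' + 1) = some (s + 1) at h
            injection h with h
            have hs2 : s' = s := by omega
            subst hs2
            cases s' with
            | zero =>
              rw [show idx + 2 = idx + 1 + 1 by omega]
              simpa using ih2 hs
            | succ s'' =>
              rw [ih3 s'' hs]
              congr 2
              omega

-- one-step unfolding of B's loop
theorem pvCLoop_succ (l : List String) (k : Nat) (m : Option Nat) :
    pvCLoop l (k + 1) m =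
      pvCLoop l k
        (if (PySem.Int.ofStr? (l.getD (k + 1) "")).getD 0 < (PySem.Int.ofStr? (l.getD k "")).getD 0
            ∨ (l.getD k "" = l.getD (k + 1) "" ∧ m = some (k + 2))
         then some (k + 1) else m) := rfl

-- B's pass on x :: t = B's pass on t with every mark shifted, then the final step on the pair (x, t₀)
theorem pvCLoop_cons : ∀ (k : Nat) (t : List String) (x : String) (m : Option Nat),
    pvCLoop (x :: t) (k + 1) (m.map (· + 1)) =
      (if (PySem.Int.ofStr? (t.getD 0 "")).getD 0 < (PySem.Int.ofStr? x).getD 0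
          ∨ (x = t.getD 0 "" ∧ (pvCLoop t k m).map (· + 1) = some 2)
       then some 1 else (pvCLoop t k m).map (· + 1)) := by
  intro k
  induction k with
  | zero =>
    intro t x m
    rw [pvCLoop_succ]
    simp only [List.getD_cons_succ, List.getD_cons_zero]
    rfl
  | succ k ih =>
    intro t x m
    rw [pvCLoop_succ (x :: t), pvCLoop_succ t]
    simp only [List.getD_cons_succ]
    have hmap : ∀ (mm : Option Nat) (c : Nat), (mm.map (· + 1) = some (c + 1)) ↔ mm = some c := by
      intro mm c
      cases mm with
      | none => simp
      | some v => simp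
    by_cases hc : (PySem.Int.ofStr? (t.getD (k + 1) "")).getD 0 < (PySem.Int.ofStr? (t.getD k "")).getD 0
        ∨ (t.getD k "" = t.getD (k + 1) "" ∧ m = some (k + 2))
    · have hc' : (PySem.Int.ofStr? (t.getD (k + 1) "")).getD 0 < (PySem.Int.ofStr? (t.getD k "")).getD 0
          ∨ (t.getD k "" = t.getD (k + 1) "" ∧ m.map (· + 1) = some (k + 2 + 1)) := by
        rcases hc with h | ⟨h1, h2⟩
        · exact Or.inl h
        · exact Or.inr ⟨h1, by rw [h2]; rfl⟩
      rw [if_pos hc, if_pos hc']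
      have : (some (k + 2) : Option Nat) = (some (k + 1)).map (· + 1) := rfl
      rw [this, ih]
    · have hc' : ¬ ((PySem.Int.ofStr? (t.getD (k + 1) "")).getD 0 < (PySem.Int.ofStr? (t.getD k "")).getD 0
          ∨ (t.getD k "" = t.getD (k + 1) "" ∧ m.map (· + 1) = some (k + 2 + 1))) := by
        rcases Classical.em ((PySem.Int.ofStr? (t.getD (k + 1) "")).getD 0 < (PySem.Int.ofStr? (t.getD k "")).getD 0) with h | h
        · exact fun _ => hc (Or.inl h)
        · rintro (h1 | ⟨h1, h2⟩)
          · exact h h1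
          · exact hc (Or.inr ⟨h1, (hmap m (k + 2)).mp h2⟩)
      rw [if_neg hc, if_neg hc', ih]

-- B's full pass computes exactly A's fix boundary: pvSpec shifted by one
theorem pvCmain : ∀ (l : List String), pvCLoop l (l.length - 1) none = (pvSpec l).map (· + 1) := by
  intro l
  induction l with
  | nil => rfl
  | cons x t ih =>
    cases t with
    | nil => rfl
    | cons y t2 =>
      have hlen : (x :: y :: t2).length - 1 = ((y :: t2).length - 1) + 1 := by simp
      have hnone : (none : Option Nat) = Option.map (· + 1) none := rfl
      rw [hlen, hnone, pvCLoop_cons ((y :: t2).length - 1) (y :: t2) x none, ih]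
      simp only [List.getD_cons_zero]
      cases hs : pvSpec (y :: t2) with
      | none =>
        simp only [Option.map_none]
        by_cases hd : (PySem.Int.ofStr? y).getD 0 < (PySem.Int.ofStr? x).getD 0
        · rw [if_pos (Or.inl hd)]
          simp only [pvSpec, if_pos hd]
          rfl
        · rw [if_neg (by rintro (h | ⟨-, h⟩); exacts [hd h, absurd h (by simp)])]
          simp only [pvSpec, if_neg hd, hs]
          rfl
      | some s' =>
        simp only [Option.map_some]
        by_cases hd : (PySem.Int.ofStr? y).getD 0 < (PySem.Int.ofStr? x).getD 0
        · rw [if_pos (Or.inl hd)]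
          simp only [pvSpec, if_pos hd]
          rfl
        · by_cases hxy : x = y ∧ s' = 0
          · rw [if_pos (Or.inr ⟨by rw [hxy.1], by rw [hxy.2]⟩)]
            simp only [pvSpec, if_neg hd, hs, if_pos hxy]
            rfl
          · rw [if_neg ?_]
            · simp only [pvSpec, if_neg hd, hs, if_neg hxy]
              rfl
            · rintro (h | ⟨h1, h2⟩)
              · exact hd h
              · injection h2 with h2
                exact hxy ⟨h1, by omega⟩

-- ===== VERDICT (by name: the statement is the Claim_ definition above) =====
theorem find_nearest_tidy_spec : Claim_equal_find_nearest_tidy := by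
  intro number _hdom hpre
  unfold Spec_find_nearest_tidy
  obtain ⟨hne, -, -⟩ := hpre
  obtain ⟨x, t, rfl⟩ : ∃ x t, number = x :: t := by
    cases number with
    | nil => exact absurd rfl hne
    | cons a b => exact ⟨a, b, rfl⟩
  have hA0 : pvALoop (x :: t) 0 none none = pvALoop t (0 + 1) (some x) (some 0) := rfl
  obtain ⟨a1, a2, a3⟩ := pvALoop_spec t x 0 0
  have hC := pvCmain (x :: t)
  cases hs : pvSpec (x :: t) with
  | none =>
    have hA : (pvALoop (x :: t) 0 none none).1 = false := by rw [hA0]; exact a1 hs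
    rw [hs] at hC
    simp only [List.length_cons, Nat.add_sub_cancel, Option.map_none] at hC
    simp [find_nearest_tidy, find_nearest_tidy_alt, hC, hA]
  | some s =>
    have hA : pvALoop (x :: t) 0 none none = (true, some s) := by
      rw [hA0]
      cases s with
      | zero => exact a2 hs
      | succ s' =>
        have h' : 0 + 1 + s' = s' + 1 := by omega
        rw [a3 s' hs, h']
    rw [hs] at hC
    have hslen : s + 2 ≤ (x :: t).length := pvSpec_len _ s hs
    have hn1len : ((x :: t).set s (pvDec ((x :: t).getD s ""))).length = (x :: t).length := by simp
    have hfill := pvFill9 ((x :: t).length - (s + 1))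
      ((x :: t).set s (pvDec ((x :: t).getD s ""))) (s + 1)
      (by rw [hn1len]; omega) (by rw [hn1len]; omega)
    have hAval : find_nearest_tidy (x :: t)
        = (PySem.Int.ofStr? (PySem.Str.join ""
            ((x :: t).take s ++ [pvDec ((x :: t).getD s "")]
              ++ List.replicate ((x :: t).length - (s + 1)) "9"))).getD 0 := by
      simp only [find_nearest_tidy, hA, Option.getD_some, ite_true]
      rw [show ((s : Int) + 1) = ((s + 1 : Nat) : Int) by push_cast; ring]
      rw [show ((x :: t).length : Int) = (((x :: t).set s (pvDec ((x :: t).getD s ""))).length : Int) by rw [hn1len]]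
      rw [hfill, hn1len]
      rw [take_succ_set _ s _ (by omega), List.append_assoc]
    have hBval : find_nearest_tidy_alt (x :: t)
        = (PySem.Int.ofStr? (PySem.Str.join ""
            ((x :: t).take s ++ [pvDec ((x :: t).getD s "")]
              ++ List.replicate ((x :: t).length - (s + 1)) "9"))).getD 0 := by
      simp only [find_nearest_tidy_alt, hC, Option.map_some, Nat.add_sub_cancel]
      rw [take_succ_set _ s _ (by omega), List.append_assoc]
    rw [hAval, hBval]
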